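-- pv_equiv track=rewrite | github.com/asabyr/specter_optimization | code/BandOptimizationFunctions.py | equal_initial_bands
-- ===== SOURCE A (Python) =====
-- def equal_initial_bands(min_freq, max_freq, dfreq):
--
--     bands=[[min_freq, min_freq+dfreq]] #initiallize first band
--     edge=bands[0][1] #initialize lowest edge
--     i=0
--     while edge < max_freq:
--
--         bands.append([bands[i][1],bands[i][1]+dfreq])
--         i+=1
--         edge=bands[-1][1]
--     return bands
-- ===== SOURCE B (Python) =====
-- def equal_initial_bands(min_freq, max_freq, dfreq):
--     if min_freq + dfreq >= max_freq:
--         extra = 0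
--     else:
--         extra = -((min_freq + dfreq - max_freq) // dfreq)  # ceil((max-min-dfreq)/dfreq)
--     return [[min_freq + k * dfreq, min_freq + (k + 1) * dfreq] for k in range(extra + 1)]
-- ===== Notes on version B (the rewrite author's own statement) =====
-- stated objective: simpler
-- what changed: replaces A's incremental append-loop (tracking bands, an index i and a moving edge) with a closed-form ceiling-division count of bands and a single comprehension
import Mathlib
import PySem

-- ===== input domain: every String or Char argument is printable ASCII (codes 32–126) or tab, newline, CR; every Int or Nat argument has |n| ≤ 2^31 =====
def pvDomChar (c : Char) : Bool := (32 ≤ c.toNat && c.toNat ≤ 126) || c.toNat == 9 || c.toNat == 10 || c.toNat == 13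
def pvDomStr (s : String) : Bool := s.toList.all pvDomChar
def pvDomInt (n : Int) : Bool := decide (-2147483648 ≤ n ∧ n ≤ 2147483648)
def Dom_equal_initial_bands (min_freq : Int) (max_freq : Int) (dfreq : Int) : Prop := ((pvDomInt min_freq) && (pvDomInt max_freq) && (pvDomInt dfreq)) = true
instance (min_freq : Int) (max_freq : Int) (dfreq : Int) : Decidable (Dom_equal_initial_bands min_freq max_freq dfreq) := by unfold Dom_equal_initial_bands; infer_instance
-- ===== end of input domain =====

-- B replaces A's incremental append-loop with a closed-form ceiling-division band count
-- and a single comprehension (objective: simpler; same asymptotic cost).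

-- ===== PORT A =====
-- while-loop of A, with fuel (the fuel chosen at the call site covers every terminating run)
def pvLoopA (max_freq dfreq : Int) : Nat → List (List Int) → Int → Int → List (List Int)
  | 0, bands, _, _ => bands
  | fuel+1, bands, i, edge =>
    if edge < max_freq then
      -- bands.append([bands[i][1], bands[i][1]+dfreq]); i += 1; edge = bands[-1][1]
      let prev := PySem.List.pyGetD (PySem.List.pyGetD bands i []) 1 0
      let bands' := bands ++ [[prev, prev + dfreq]]
      let edge' := PySem.List.pyGetD (PySem.List.pyGetD bands' (-1) []) 1 0
      pvLoopA max_freq dfreq fuel bands' (i+1) edge'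
    else bands

def equal_initial_bands (min_freq : Int) (max_freq : Int) (dfreq : Int) : List (List Int) :=
  let bands : List (List Int) := [[min_freq, min_freq + dfreq]]
  let edge := PySem.List.pyGetD (PySem.List.pyGetD bands 0 []) 1 0
  pvLoopA max_freq dfreq ((max_freq - (min_freq + dfreq)).toNat + 1) bands 0 edge

-- ===== PORT B =====
def equal_initial_bands_alt (min_freq : Int) (max_freq : Int) (dfreq : Int) : List (List Int) :=
  let extra : Int :=
    if min_freq + dfreq ≥ max_freq then 0
    else -(PySem.Int.floordiv (min_freq + dfreq - max_freq) dfreq)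
  (PySem.List.pyRange 0 (extra + 1)).map
    (fun k => [min_freq + k * dfreq, min_freq + (k + 1) * dfreq])

-- ===== PRECONDITION & SPEC =====
-- Pre_ excludes exactly the inputs on which A never returns (the while loop diverges):
-- dfreq ≤ 0 with min_freq + dfreq < max_freq, where the edge never reaches max_freq.
def Pre_equal_initial_bands (min_freq : Int) (max_freq : Int) (dfreq : Int) : Prop :=
  min_freq + dfreq ≥ max_freq ∨ 0 < dfreq
instance (min_freq : Int) (max_freq : Int) (dfreq : Int) : Decidable (Pre_equal_initial_bands min_freq max_freq dfreq) := by unfold Pre_equal_initial_bands; infer_instance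

def pvWitness_equal_initial_bands : Int × Int × Int := (0, 10, 3)

def Spec_equal_initial_bands (min_freq : Int) (max_freq : Int) (dfreq : Int) (out : List (List Int)) : Prop := out = equal_initial_bands_alt min_freq max_freq dfreq
instance (min_freq : Int) (max_freq : Int) (dfreq : Int) (out : List (List Int)) : Decidable (Spec_equal_initial_bands min_freq max_freq dfreq out) := by unfold Spec_equal_initial_bands; infer_instance

-- ===== CLAIM (what is proved, stated in full; the proofs are below) =====
def Claim_equal_equal_initial_bands : Prop := ∀ (min_freq : Int) (max_freq : Int) (dfreq : Int), Dom_equal_initial_bands min_freq max_freq dfreq → Pre_equal_initial_bands min_freq max_freq dfreq → Spec_equal_initial_bands min_freq max_freq dfreq (equal_initial_bands min_freq max_freq dfreq)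

-- ===== LEMMAS AND PROOFS =====

-- the k-th band and the list of the first n bands
def pvBand (m d : Int) (k : Nat) : List Int := [m + (k : Int) * d, m + ((k : Int) + 1) * d]
def pvBands (m d : Int) (n : Nat) : List (List Int) := (List.range n).map (pvBand m d)

lemma pvLoopA_eq (m M d : Int) (N : Nat)
    (hN : ¬ (m + (N : Int) * d < M))
    (hlt : ∀ k : Nat, 1 ≤ k → k < N → m + (k : Int) * d < M) :
    ∀ (fuel i : Nat), i + 1 ≤ N → N ≤ fuel + (i + 1) →
      pvLoopA M d fuel (pvBands m d (i + 1)) (i : Int) (m + ((i : Int) + 1) * d)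
        = pvBands m d N := by
  intro fuel
  induction fuel with
  | zero =>
    intro i h1 h2
    have : N = i + 1 := by omega
    subst this
    simp [pvLoopA]
  | succ fuel ih =>
    intro i h1 h2
    by_cases h : m + ((i : Int) + 1) * d < M
    · have hiN : i + 1 < N := by
        rcases Nat.lt_or_ge (i+1) N with hlt' | hge
        · exact hlt'
        · exfalso
          have : N = i + 1 := by omega
          subst this
          apply hN
          push_cast
          exact h
      have hprev : PySem.List.pyGetD (PySem.List.pyGetD (pvBands m d (i + 1)) (i : Int) []) 1 0
          = m + ((i : Int) + 1) * d := by
        unfold pvBands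
        rw [PySem.List.pyGetD_natCast, PySem.List.getD_map_range _ _ _ _ (by omega)]
        unfold pvBand
        simp [PySem.List.pyGetD_ofNat']
      rw [pvLoopA, if_pos h]
      dsimp only
      rw [hprev]
      have hbands : pvBands m d (i + 1) ++
          [[m + ((i : Int) + 1) * d, m + ((i : Int) + 1) * d + d]] = pvBands m d (i + 2) := by
        simp [pvBands, pvBand, List.range_succ]
        ring
      rw [hbands]
      have hedge : PySem.List.pyGetD (PySem.List.pyGetD (pvBands m d (i + 2)) (-1) []) 1 0
          = m + ((i : Int) + 2) * d := by
        have : pvBands m d (i + 2) = pvBands m d (i + 1) ++ [pvBand m d (i + 1)] := by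
          simp [pvBands, List.range_succ]
        rw [this, PySem.List.pyGetD_neg_one_append_singleton]
        rw [PySem.List.pyGetD_ofNat' _ 1 _]
        unfold pvBand
        simp only [List.getD_cons_succ, List.getD_cons_zero]
        push_cast
        ring
      rw [hedge]
      have := ih (i + 1) (by omega) (by omega)
      push_cast at this ⊢
      convert this using 2
    · rw [pvLoopA, if_neg h]
      have : N = i + 1 := by
        rcases Nat.lt_or_ge (i+1) N with hlt' | hge
        · exfalso
          apply h
          have := hlt (i+1) (by omega) hlt'
          push_cast at this
          exact this
        · omega
      rw [this]

lemma pvBands_one (m d : Int) : pvBands m d 1 = [[m, m + d]] := by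
  simp [pvBands, pvBand]

theorem equal_initial_bands_spec : Claim_equal_equal_initial_bands := by
  intro m M d _ hpre
  unfold Spec_equal_initial_bands equal_initial_bands equal_initial_bands_alt
  dsimp only
  have hedge0 : PySem.List.pyGetD (PySem.List.pyGetD [[m, m + d]] 0 []) 1 0 = m + d := by
    simp [PySem.List.pyGetD_ofNat']
  rw [hedge0]
  by_cases h1 : m + d ≥ M
  · -- loop never runs; B produces the single initial band
    rw [if_pos h1]
    have hfuel : (M - (m + d)).toNat + 1 = 0 + 1 := by omega
    rw [hfuel, pvLoopA, if_neg (by omega)]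
    have : ((0 : Int) + 1) = ((1 : Nat) : Int) := by norm_num
    rw [this, PySem.List.pyRange_zero_natCast]
    simp [List.range_succ]
  · -- loop runs: dfreq > 0, closed-form count
    have hd : 0 < d := by
      rcases hpre with h | h
      · exact absurd h h1
      · exact h
    have hlt0 : m + d < M := by omega
    set a : Int := m + d - M with ha
    have hq : PySem.Int.floordiv a d = a / d := PySem.Int.floordiv_eq_ediv_of_pos hd
    set q : Int := a / d with hqdef
    have hdm : d * q + a % d = a := Int.mul_ediv_add_emod a d
    have hr0 : 0 ≤ a % d := Int.emod_nonneg a (by omega)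
    have hr1 : a % d < d := Int.emod_lt_of_pos a hd
    have hqneg : q < 0 := by nlinarith
    have hqa : a ≤ q := by nlinarith
    set N : Nat := (-q).toNat + 1 with hNdef
    have hNcast : ((-q).toNat : Int) = -q := Int.toNat_of_nonneg (by omega)
    have hN : ¬ (m + (N : Int) * d < M) := by
      push_cast [hNdef, hNcast]
      nlinarith
    have hlt : ∀ k : Nat, 1 ≤ k → k < N → m + (k : Int) * d < M := by
      intro k hk1 hkN
      have hk : (k : Int) ≤ -q := by
        have : (k : Int) < (N : Int) := by exact_mod_cast hkN
        push_cast [hNdef, hNcast] at this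
        omega
      nlinarith
    have hfuelN : N ≤ ((M - (m + d)).toNat + 1) + (0 + 1) := by
      have : -q ≤ -a := by omega
      omega
    have hmain := pvLoopA_eq m M d N hN hlt ((M - (m + d)).toNat + 1) 0 (by omega) hfuelN
    rw [pvBands_one] at hmain
    have h0 : ((0 : Nat) : Int) = 0 := rfl
    rw [h0] at hmain
    norm_num at hmain
    rw [hmain]
    rw [if_neg h1, hq]
    have hcast : -q + 1 = ((N : Nat) : Int) := by
      push_cast [hNdef, hNcast]
      ring
    rw [hcast, PySem.List.pyRange_zero_natCast]
    simp [pvBands, pvBand, List.map_map, Function.comp]
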